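-- pv_equiv track=rewrite | github.com/MdAbdulMalek/CSV_FLASK_DJANGO-2 | convertapp/utils.py | convert_special_character
-- ===== SOURCE A (Python) =====
-- special_chars = [".", "+",  "'"]
--
-- def convert_special_character(line):
--     flag = 0
--     for i, word in enumerate(line):
--
--         s = ''
--         for c in word:
--             if c in special_chars:
--                 flag = 1
--                 s = c
--         if flag:
--             rep = '\\' + s
--             word = word.replace(s, rep)
--             line[i] = word
--             flag = 0
--     return line
-- ===== SOURCE B (Python) =====
-- special_chars = [".", "+", "'"]
--
-- def _escape_last(word):
--     best, s = -1, None
--     for ch in special_chars: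
--         p = word.rfind(ch)
--         if p > best:
--             best, s = p, ch
--     return word if s is None else word.replace(s, '\\' + s)
--
-- def convert_special_character(line):
--     line[:] = [_escape_last(word) for word in line]
--     return line
-- ===== Notes on version B (the rewrite author's own statement) =====
-- stated objective: idiomatic
-- what changed: Instead of A's char-by-char scan per word with a flag/last-char accumulator, B loops over the three fixed special chars, queries word.rfind(ch) for each, and escapes the char with the maximal last position; the word loop becomes a comprehension assigned back via line[:].
import Mathlib
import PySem

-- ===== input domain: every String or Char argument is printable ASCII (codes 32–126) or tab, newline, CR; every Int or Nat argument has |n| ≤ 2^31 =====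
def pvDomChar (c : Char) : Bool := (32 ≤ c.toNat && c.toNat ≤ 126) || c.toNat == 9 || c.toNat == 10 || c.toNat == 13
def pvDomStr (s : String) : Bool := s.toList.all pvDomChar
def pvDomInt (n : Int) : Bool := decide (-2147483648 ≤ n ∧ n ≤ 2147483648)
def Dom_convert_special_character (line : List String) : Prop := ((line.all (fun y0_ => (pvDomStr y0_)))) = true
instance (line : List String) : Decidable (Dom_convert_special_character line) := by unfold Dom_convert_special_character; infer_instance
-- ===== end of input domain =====

-- B replaces A's per-character scan by an rfind query per special char (idiomatic decomposition, same cost);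
-- both Pythons mutate `line` in place identically and return it; the ports model the returned value.

-- ===== PORT A =====
-- Python: special_chars = [".", "+", "'"]  — A iterates the word's characters, so the A-side uses them as Chars
def specialChars : List Char := ['.', '+', '\'']

-- inner loop body: 'if c in special_chars: flag = 1; s = c'  (s is a 1-char Python string → String.singleton)
def pvInnerStep (st : Int × String) (c : Char) : Int × String :=
  if c ∈ specialChars then (1, String.singleton c) else st

-- one iteration of 'for i, word in enumerate(line)' (the enumerate index is nonnegative, so .toNat is exact)
def pvStepA (st : List String × Int) (p : Int × String) : List String × Int :=
  let inner := p.2.toList.foldl pvInnerStep (st.2, "")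
  if inner.1 ≠ 0 then
    (st.1.set p.1.toNat (PySem.Str.replace p.2 inner.2 ("\\" ++ inner.2)), 0)
  else (st.1, inner.1)

def convert_special_character (line : List String) : List String :=
  ((PySem.List.enumerate line 0).foldl pvStepA (line, 0)).1

-- ===== PORT B =====
def specialStrs : List String := [".", "+", "'"]

-- loop body of B's 'for ch in special_chars' with word.rfind(ch)
def pvPickStep (w : String) (st : Int × Option String) (ch : String) : Int × Option String :=
  let p := PySem.Str.rfind w ch
  if p > st.1 then (p, some ch) else st

def pvEscapeLast (w : String) : String :=
  let r := specialStrs.foldl (pvPickStep w) (-1, none)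
  match r.2 with
  | none => w
  | some s => PySem.Str.replace w s ("\\" ++ s)

def convert_special_character_alt (line : List String) : List String :=
  line.map pvEscapeLast

-- ===== PRECONDITION & SPEC =====
def Spec_convert_special_character (line : List String) (out : List String) : Prop := out = convert_special_character_alt line
instance (line : List String) (out : List String) : Decidable (Spec_convert_special_character line out) := by unfold Spec_convert_special_character; infer_instance

-- ===== CLAIM (what is proved, stated in full; the proofs are below) =====
def Claim_equal_convert_special_character : Prop := ∀ (line : List String), Dom_convert_special_character line → Spec_convert_special_character line (convert_special_character line)

-- ===== LEMMAS AND PROOFS =====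

-- the last special character of a word (what A's inner scan accumulates in s)
def pvLastSpec (cs : List Char) : Option Char := cs.reverse.find? (· ∈ specialChars)

theorem pvInnerFold (cs : List Char) :
    cs.foldl pvInnerStep (0, "") =
      match pvLastSpec cs with
      | none => ((0 : Int), "")
      | some c => ((1 : Int), String.singleton c) := by
  induction cs using List.reverseRecOn with
  | nil => rfl
  | append_singleton cs d ih =>
      simp only [List.foldl_append, List.foldl_cons, List.foldl_nil, ih, pvLastSpec,
        List.reverse_append, List.reverse_singleton, List.singleton_append, List.find?_cons]
      by_cases hd : d ∈ specialChars
      · simp [pvInnerStep, hd]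
      · simp only [pvInnerStep, hd]
        simp


theorem pvGoZero (s sub : List Char) :
    PySem.Chars.rfind.go s sub 0 = if sub.isPrefixOf s then 0 else -1 := rfl

theorem pvGoSucc (s sub : List Char) (j : Nat) :
    PySem.Chars.rfind.go s sub (j + 1) =
      if sub.isPrefixOf (s.drop (j + 1)) then ((j : Int) + 1) else PySem.Chars.rfind.go s sub j := rfl

theorem pvPrefixSingleton (c d : Char) (t : List Char) (ht : t ≠ []) :
    List.isPrefixOf [c] (t ++ [d]) = List.isPrefixOf [c] t := by
  cases t with
  | nil => exact absurd rfl ht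
  | cons a t' => simp [List.isPrefixOf]

theorem pvGoEq (cs : List Char) (d c : Char) :
    ∀ j, j < cs.length → PySem.Chars.rfind.go (cs ++ [d]) [c] j = PySem.Chars.rfind.go cs [c] j := by
  intro j
  induction j with
  | zero =>
      intro h
      rw [pvGoZero, pvGoZero, pvPrefixSingleton c d cs (by intro hnil; simp [hnil] at h)]
  | succ j ih =>
      intro h
      rw [pvGoSucc, pvGoSucc, List.drop_append_of_le_length (by omega),
        pvPrefixSingleton c d _ (by
          intro hnil
          have := List.length_drop (l := cs) (i := j + 1)
          rw [hnil] at this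
          simp at this; omega),
        ih (by omega)]


theorem pvRfindAppend (cs : List Char) (d c : Char) :
    PySem.Chars.rfind (cs ++ [d]) [c] =
      if d = c then (cs.length : Int) else PySem.Chars.rfind cs [c] := by
  show PySem.Chars.rfind.go (cs ++ [d]) [c] (cs ++ [d]).length = _
  rw [List.length_append, List.length_singleton, pvGoSucc]
  have hdrop : List.drop (cs.length + 1) (cs ++ [d]) = [] :=
    List.drop_eq_nil_of_le (by simp)
  rw [hdrop]
  simp only [List.isPrefixOf, Bool.false_eq_true, if_false]
  cases cs with
  | nil =>
      show PySem.Chars.rfind.go [d] [c] 0 = _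
      rw [pvGoZero]
      show _ = if d = c then ((0:Nat) : Int) else PySem.Chars.rfind.go [] [c] 0
      rw [pvGoZero]
      by_cases h : d = c <;> simp [List.isPrefixOf, h]
      · intro hc; exact absurd hc.symm h
  | cons a t =>
      show PySem.Chars.rfind.go ((a :: t) ++ [d]) [c] (t.length + 1) = _
      rw [pvGoSucc]
      have hdrop2 : List.drop (t.length + 1) ((a :: t) ++ [d]) = [d] := by
        rw [List.cons_append, List.drop_succ_cons, List.drop_append_of_le_length (le_refl _),
          List.drop_length, List.nil_append]
      rw [hdrop2]
      by_cases h : d = c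
      · simp [List.isPrefixOf, h, List.length_cons]
      · have hpre : List.isPrefixOf [c] [d] = false := by
          simp [List.isPrefixOf]; intro hc; exact absurd hc.symm h
        rw [hpre]
        simp only [Bool.false_eq_true, if_false, if_neg h]
        rw [pvGoEq (a :: t) d c t.length (by simp)]
        show _ = PySem.Chars.rfind.go (a :: t) [c] (a :: t).length
        rw [List.length_cons, pvGoSucc, List.drop_succ_cons, List.drop_length]
        simp [List.isPrefixOf]

theorem pvRfindLt (cs : List Char) (c : Char) :
    PySem.Chars.rfind cs [c] < cs.length := by
  induction cs using List.reverseRecOn with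
  | nil =>
      show PySem.Chars.rfind.go [] [c] 0 < 0
      rw [pvGoZero]; simp [List.isPrefixOf]
  | append_singleton cs d ih =>
      rw [pvRfindAppend]
      simp only [List.length_append, List.length_singleton]
      split_ifs <;> push_cast <;> omega

theorem pvNegOneLeRfind (cs : List Char) (c : Char) :
    -1 ≤ PySem.Chars.rfind cs [c] := by
  induction cs using List.reverseRecOn with
  | nil =>
      show -1 ≤ PySem.Chars.rfind.go [] [c] 0
      rw [pvGoZero]; simp [List.isPrefixOf]
  | append_singleton cs d ih =>
      rw [pvRfindAppend]
      split_ifs <;> [omega; exact ih]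



-- char-level version of B's 3-step selection fold
theorem pvSelEqC (cs : List Char) :
    ((([".", "+", "'"] : List String).foldl
        (fun (st : Int × Option String) ch =>
          if PySem.Chars.rfind cs ch.toList > st.1 then (PySem.Chars.rfind cs ch.toList, some ch) else st)
        (-1, none)).2) = (pvLastSpec cs).map String.singleton := by
  induction cs using List.reverseRecOn with
  | nil => decide
  | append_singleton cs d ih =>
      have h1 : (".":String).toList = ['.'] := rfl
      have h2 : ("+":String).toList = ['+'] := rfl
      have h3 : ("'":String).toList = ['\''] := rfl
      simp only [List.foldl_cons, List.foldl_nil, h1, h2, h3] at ih ⊢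
      rw [pvRfindAppend, pvRfindAppend, pvRfindAppend]
      have b1 := pvRfindLt cs '.'
      have b2 := pvRfindLt cs '+'
      have b3 := pvRfindLt cs '\''
      have n1 := pvNegOneLeRfind cs '.'
      have n2 := pvNegOneLeRfind cs '+'
      have n3 := pvNegOneLeRfind cs '\''
      have hls : pvLastSpec (cs ++ [d]) =
          if d ∈ specialChars then some d else pvLastSpec cs := by
        simp only [pvLastSpec, List.reverse_append, List.reverse_singleton, List.singleton_append,
          List.find?_cons]
        by_cases hd : d ∈ specialChars <;> simp [hd]
      rw [hls]
      by_cases hd1 : d = '.'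
      · subst hd1
        rw [if_pos (show ('.':Char) ∈ specialChars by decide)]
        rw [if_pos (rfl : ('.':Char) = '.'), if_neg (show ¬('.':Char) = '+' by decide),
          if_neg (show ¬('.':Char) = '\'' by decide)]
        have s1 : ((cs.length : Int)) > ((-1 : Int), (none : Option String)).1 := by simp; omega
        rw [if_pos s1]
        rw [if_neg (show ¬ PySem.Chars.rfind cs ['+'] > ((cs.length:Int), some ".").1 by simp; omega)]
        rw [if_neg (show ¬ PySem.Chars.rfind cs ['\''] > ((cs.length:Int), some ".").1 by simp; omega)]
        rfl
      · by_cases hd2 : d = '+'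
        · subst hd2
          rw [if_neg (show ¬('+':Char) = '.' by decide), if_pos (rfl : ('+':Char) = '+'),
            if_neg (show ¬('+':Char) = '\'' by decide),
            if_pos (show ('+':Char) ∈ specialChars by decide)]
          by_cases hp1 : PySem.Chars.rfind cs ['.'] > ((-1:Int), (none : Option String)).1
          · rw [if_pos hp1,
              if_pos (show ((cs.length:Int)) > (PySem.Chars.rfind cs ['.'], some ".").1 by simp; omega),
              if_neg (show ¬ PySem.Chars.rfind cs ['\''] > ((cs.length:Int), some "+").1 by simp; omega)]
            rfl
          · rw [if_neg hp1,
              if_pos (show ((cs.length:Int)) > ((-1:Int), (none : Option String)).1 by simp; omega),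
              if_neg (show ¬ PySem.Chars.rfind cs ['\''] > ((cs.length:Int), some "+").1 by simp; omega)]
            rfl
        · by_cases hd3 : d = '\''
          · subst hd3
            rw [if_neg (show ¬('\'':Char) = '.' by decide), if_neg (show ¬('\'':Char) = '+' by decide),
              if_pos (rfl : ('\'':Char) = '\''),
              if_pos (show ('\'':Char) ∈ specialChars by decide)]
            by_cases hp1 : PySem.Chars.rfind cs ['.'] > ((-1:Int), (none : Option String)).1
            · rw [if_pos hp1]
              by_cases hp2 : PySem.Chars.rfind cs ['+'] > (PySem.Chars.rfind cs ['.'], some (".":String)).1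
              · rw [if_pos hp2,
                  if_pos (show ((cs.length:Int)) > (PySem.Chars.rfind cs ['+'], some "+").1 by simp; omega)]
                rfl
              · rw [if_neg hp2,
                  if_pos (show ((cs.length:Int)) > (PySem.Chars.rfind cs ['.'], some ".").1 by simp; omega)]
                rfl
            · rw [if_neg hp1]
              by_cases hp2 : PySem.Chars.rfind cs ['+'] > ((-1:Int), (none : Option String)).1
              · rw [if_pos hp2,
                  if_pos (show ((cs.length:Int)) > (PySem.Chars.rfind cs ['+'], some "+").1 by simp; omega)]
                rfl
              · rw [if_neg hp2,
                  if_pos (show ((cs.length:Int)) > ((-1:Int), (none : Option String)).1 by simp; omega)]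
                rfl
          · rw [if_neg (show ¬ d = '.' from hd1), if_neg (show ¬ d = '+' from hd2),
              if_neg (show ¬ d = '\'' from hd3),
              if_neg (show d ∉ specialChars by simp [specialChars, hd1, hd2, hd3])]
            exact ih

theorem pvSelEq (w : String) :
    (specialStrs.foldl (pvPickStep w) (-1, none)).2 = (pvLastSpec w.toList).map String.singleton := by
  have h := pvSelEqC w.toList
  simp only [specialStrs]
  simpa using h

theorem pvEscapeChar (w : String) :
    pvEscapeLast w =
      match pvLastSpec w.toList with
      | none => w
      | some c => PySem.Str.replace w (String.singleton c) ("\\" ++ String.singleton c) := by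
  have hs := pvSelEq w
  show (match (specialStrs.foldl (pvPickStep w) (-1, none)).2 with
        | none => w
        | some s => PySem.Str.replace w s ("\\" ++ s)) = _
  rw [hs]
  cases pvLastSpec w.toList <;> rfl

theorem pvSetAppend {α : Type} (pre : List α) (w v : α) (suf : List α) :
    (pre ++ w :: suf).set pre.length v = pre ++ v :: suf := by
  induction pre with
  | nil => rfl
  | cons a pre ih => simp [ih]

theorem pvOuter (suf : List String) :
    ∀ pre : List String,
      (List.foldl pvStepA (pre ++ suf, 0) (PySem.List.enumerate suf (pre.length : Int))).1 =
        pre ++ suf.map pvEscapeLast := by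
  induction suf with
  | nil => intro pre; simp [PySem.List.enumerate_nil]
  | cons w suf ih =>
      intro pre
      rw [PySem.List.enumerate_cons, List.foldl_cons]
      have hstep : pvStepA (pre ++ w :: suf, 0) ((pre.length : Int), w) =
          ((pre ++ [pvEscapeLast w]) ++ suf, 0) := by
        unfold pvStepA
        rw [show ((pre ++ w :: suf, (0:Int)).2, "") = ((0:Int), "") from rfl]
        rw [pvInnerFold]
        rw [pvEscapeChar]
        cases h : pvLastSpec w.toList with
        | none => simp
        | some c =>
            simp only
            rw [if_pos (by decide : (1:Int) ≠ 0)]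
            simp only [Int.toNat_natCast]
            rw [pvSetAppend]
            simp
      rw [hstep]
      have hlen : (pre.length : Int) + 1 = (((pre ++ [pvEscapeLast w]).length : Nat) : Int) := by
        simp
      rw [hlen, ih (pre ++ [pvEscapeLast w])]
      simp

-- ===== VERDICT (by name: the statement is the Claim_ definition above) =====
theorem convert_special_character_spec : Claim_equal_convert_special_character := by
  intro line _
  show convert_special_character line = convert_special_character_alt line
  have h := pvOuter line []
  simpa [convert_special_character, convert_special_character_alt] using h
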